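-- pv_equiv track=rewrite | github.com/108anup/NetMon-query-planner | gurobi/input.py | shift_overlay
-- ===== SOURCE A (Python) =====
-- def shift_overlay(overlay):
--     last = overlay[-1]
--     l_len = len(last)
--     hlen = int(l_len/2)
--     new_overlay = []
--     lfh = last[:hlen]
--     prev_sh = last[hlen:]
--     for ol in overlay[:-1]:
--         ol_len = len(ol)
--         hlen = int(ol_len/2)
--         fh = ol[:hlen]
--         sh = ol[hlen:]
--         new_overlay.append(prev_sh + fh)
--         prev_sh = sh
--     new_overlay.append(prev_sh + lfh)
--     return new_overlay
-- ===== SOURCE B (Python) =====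
-- def shift_overlay(overlay):
--     pieces = []
--     for o in overlay:
--         h = len(o) // 2
--         pieces.append(o[:h])
--         pieces.append(o[h:])
--     pieces = pieces[-1:] + pieces[:-1]  # rotate the flat piece list right by one
--     return [pieces[2 * i] + pieces[2 * i + 1] for i in range(len(overlay))]
-- ===== Notes on version B (the rewrite author's own statement) =====
-- stated objective: alternative
-- what changed: Instead of threading a prev_sh accumulator across one pass, B flattens every word into a single flat list of half-pieces [fh0, sh0, fh1, sh1, ...], rotates that flat list right by one position, and re-chunks it into consecutive pairs; the wrap-around falls out of the single global rotation rather than any accumulator priming.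
-- crash fix: On the empty list A raises IndexError at overlay[-1] while B naturally returns []. — e.g. on shift_overlay([]): A raises IndexError, B returns []
import Mathlib
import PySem

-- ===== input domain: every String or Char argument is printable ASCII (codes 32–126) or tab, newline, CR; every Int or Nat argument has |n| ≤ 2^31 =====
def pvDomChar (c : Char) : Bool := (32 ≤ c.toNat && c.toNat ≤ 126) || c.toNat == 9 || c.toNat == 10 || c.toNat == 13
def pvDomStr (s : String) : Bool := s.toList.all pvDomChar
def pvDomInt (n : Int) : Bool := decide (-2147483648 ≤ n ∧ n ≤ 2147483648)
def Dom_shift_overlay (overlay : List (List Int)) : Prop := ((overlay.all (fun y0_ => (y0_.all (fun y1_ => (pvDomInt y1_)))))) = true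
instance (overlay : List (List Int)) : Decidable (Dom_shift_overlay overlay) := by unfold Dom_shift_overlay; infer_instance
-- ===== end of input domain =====

-- B replaces A's accumulator-threaded single pass by a flatten-rotate-rechunk algorithm:
-- flatten every word into a flat list of half-pieces, rotate that list right by one,
-- and re-chunk it into consecutive pairs; objective: alternative (same cost).

-- ===== PORT A =====
-- Note: Python's int(len/2) equals len // 2 for the nonnegative lengths involved,
-- ported as Nat division.
def shift_overlay (overlay : List (List Int)) : List (List Int) :=
  match PySem.List.pyGet? overlay (-1) with          -- last = overlay[-1]; none = IndexError, excluded by Pre_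
  | none => []
  | some last =>
    let hlen := last.length / 2
    let lfh := last.take hlen                        -- last[:hlen]
    let prev_sh := last.drop hlen                    -- last[hlen:]
    let r := (PySem.List.slice overlay none (some (-1))).foldl
      (fun (st : List (List Int) × List Int) ol =>
        let h := ol.length / 2
        (st.1 ++ [st.2 ++ ol.take h], ol.drop h))
      (([] : List (List Int)), prev_sh)
    r.1 ++ [r.2 ++ lfh]

-- ===== PORT B =====
-- pieces[2*i] / pieces[2*i+1] are always in range (len(pieces) = 2*len(overlay)),
-- so pyGetD with a dummy default is exact here.
def shift_overlay_alt (overlay : List (List Int)) : List (List Int) :=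
  let pieces := overlay.foldl
    (fun (acc : List (List Int)) o =>
      let h := o.length / 2
      (acc ++ [o.take h]) ++ [o.drop h]) []
  let pieces2 := PySem.List.slice pieces (some (-1)) none
                 ++ PySem.List.slice pieces none (some (-1))     -- pieces[-1:] + pieces[:-1]
  (PySem.List.pyRange 0 overlay.length 1).map (fun i =>
    PySem.List.pyGetD pieces2 (2 * i) [] ++ PySem.List.pyGetD pieces2 (2 * i + 1) [])

-- ===== PRECONDITION & SPEC =====
-- A evaluates overlay[-1] first, so it raises IndexError on the empty list; Pre_ excludes exactly that input.
def Pre_shift_overlay (overlay : List (List Int)) : Prop := overlay ≠ []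
instance (overlay : List (List Int)) : Decidable (Pre_shift_overlay overlay) := by
  unfold Pre_shift_overlay; infer_instance
def pvWitness_shift_overlay : List (List Int) := [[1, 2, 3], [4, 5], [6]]

-- On the empty list A raises IndexError at overlay[-1] while B naturally returns [].
def Raises_shift_overlay (overlay : List (List Int)) : Prop := overlay = []
instance (overlay : List (List Int)) : Decidable (Raises_shift_overlay overlay) := by
  unfold Raises_shift_overlay; infer_instance
def pvRaiseWitness_shift_overlay : List (List Int) := []
def pvRaiseWitnessOut_shift_overlay : List (List Int) := []

def Spec_shift_overlay (overlay : List (List Int)) (out : List (List Int)) : Prop := out = shift_overlay_alt overlay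
instance (overlay : List (List Int)) (out : List (List Int)) : Decidable (Spec_shift_overlay overlay out) := by unfold Spec_shift_overlay; infer_instance

-- ===== CLAIM (what is proved, stated in full; the proofs are below) =====
def Claim_equal_shift_overlay : Prop := ∀ (overlay : List (List Int)), Dom_shift_overlay overlay → Pre_shift_overlay overlay → Spec_shift_overlay overlay (shift_overlay overlay)
def Claim_raises_shift_overlay : Prop := (∀ (overlay : List (List Int)), Dom_shift_overlay overlay → Raises_shift_overlay overlay → ¬ Pre_shift_overlay overlay) ∧ (Dom_shift_overlay (pvRaiseWitness_shift_overlay) ∧ Raises_shift_overlay (pvRaiseWitness_shift_overlay) ∧ shift_overlay_alt (pvRaiseWitness_shift_overlay) = pvRaiseWitnessOut_shift_overlay)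

-- ===== LEMMAS AND PROOFS =====

def pvHalf (o : List Int) : List Int × List Int := (o.take (o.length / 2), o.drop (o.length / 2))

def pvComb (p q : List Int × List Int) : List Int := p.2 ++ q.1

-- A's fold, characterised as a zipWith of the halves table against its rotation.
lemma foldA_eq (xs : List (List Int)) : ∀ (acc : List (List Int)) (p lp : List Int × List Int),
    (let r := xs.foldl
        (fun (st : List (List Int) × List Int) ol =>
          let h := ol.length / 2
          (st.1 ++ [st.2 ++ ol.take h], ol.drop h)) (acc, p.2)
     r.1 ++ [r.2 ++ lp.1])
    = acc ++ List.zipWith pvComb (p :: xs.map pvHalf) (xs.map pvHalf ++ [lp]) := by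
  induction xs with
  | nil => intro acc p lp; simp [pvComb]
  | cons o t ih =>
    intro acc p lp
    simp only [List.foldl_cons, List.map_cons, List.zipWith_cons_cons, List.cons_append]
    have := ih (acc ++ [p.2 ++ o.take (o.length / 2)]) (pvHalf o) lp
    simp only [pvHalf] at this
    simp [this, pvComb, pvHalf]

-- B's flat list of half-pieces.
def pvFlat (hs : List (List Int × List Int)) : List (List Int) :=
  hs.flatMap (fun p => [p.1, p.2])

lemma pvFlat_length (hs : List (List Int × List Int)) : (pvFlat hs).length = 2 * hs.length := by
  induction hs with
  | nil => rfl
  | cons p t ih => simp [pvFlat] at ih ⊢; omega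

lemma pvFlat_get (hs : List (List Int × List Int)) : ∀ (i : Nat) (h : i < hs.length)
    (h1 : 2 * i < (pvFlat hs).length) (h2 : 2 * i + 1 < (pvFlat hs).length),
    (pvFlat hs)[2 * i]'h1 = hs[i].1 ∧ (pvFlat hs)[2 * i + 1]'h2 = hs[i].2 := by
  induction hs with
  | nil => intro i h; simp at h
  | cons p t ih =>
    intro i h h1 h2
    rcases i with _ | j
    · simp [pvFlat]
    · have hlen : (pvFlat (p :: t)) = p.1 :: p.2 :: pvFlat t := by simp [pvFlat]
      have hj : j < t.length := by simpa using h
      have hj1 : 2 * j < (pvFlat t).length := by rw [pvFlat_length]; omega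
      have hj2 : 2 * j + 1 < (pvFlat t).length := by rw [pvFlat_length]; omega
      have := ih j hj hj1 hj2
      constructor
      · have e : 2 * (j + 1) = (2 * j) + 2 := by omega
        simp only [hlen, e, List.getElem_cons_succ]
        exact this.1
      · have e : 2 * (j + 1) + 1 = (2 * j + 1) + 2 := by omega
        simp only [hlen, e, List.getElem_cons_succ]
        exact this.2

lemma cons_getElem_pos {α : Type} (a : α) (l : List α) (k : Nat) (hk : 0 < k)
    (h : k < (a :: l).length) :
    (a :: l)[k] = l[k - 1]'(by simp at h; omega) := by
  rcases k with _ | j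
  · omega
  · simp

-- B's rotate-and-rechunk, characterised as the same zipWith.
lemma rechunkB_eq (hs : List (List Int × List Int)) (h : hs ≠ []) :
    (PySem.List.pyRange 0 hs.length 1).map (fun i =>
      PySem.List.pyGetD ((pvFlat hs).drop ((pvFlat hs).length - 1) ++ (pvFlat hs).dropLast) (2 * i) []
      ++ PySem.List.pyGetD ((pvFlat hs).drop ((pvFlat hs).length - 1) ++ (pvFlat hs).dropLast) (2 * i + 1) [])
    = List.zipWith pvComb (hs.getLast h :: hs.dropLast) hs := by
  have hn : 0 < hs.length := List.length_pos_of_ne_nil h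
  have hfl : (pvFlat hs).length = 2 * hs.length := pvFlat_length hs
  have hfne : pvFlat hs ≠ [] := by
    intro hc; rw [List.eq_nil_iff_length_eq_zero] at hc; omega
  -- the rotated list is getLast :: dropLast
  have hrot : (pvFlat hs).drop ((pvFlat hs).length - 1) ++ (pvFlat hs).dropLast
      = (pvFlat hs).getLast hfne :: (pvFlat hs).dropLast := by
    rw [List.drop_length_sub_one hfne]; rfl
  have hrotlen : ((pvFlat hs).getLast hfne :: (pvFlat hs).dropLast).length = 2 * hs.length := by
    simp [List.length_dropLast, hfl]; omega
  -- last piece of the flat list is the second half of the last word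
  have hlastpiece : (pvFlat hs).getLast hfne = hs[hs.length - 1].2 := by
    rw [List.getLast_eq_getElem]
    have h2 : 2 * (hs.length - 1) + 1 < (pvFlat hs).length := by omega
    have e : (pvFlat hs).length - 1 = 2 * (hs.length - 1) + 1 := by omega
    simp only [e]
    exact (pvFlat_get hs (hs.length - 1) (by omega) (by omega) h2).2
  apply List.ext_getElem
  · simp [PySem.List.length_pyRange_one, List.length_dropLast]
    omega
  · intro i hi hi'
    have hil : i < hs.length := by
      simpa [PySem.List.length_pyRange_one] using hi
    simp only [List.getElem_map, PySem.List.getElem_pyRange_one, List.getElem_zipWith, hrot]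
    have c1 : ((2 : Int) * ((0 : Int) + (i : Nat)) ) = (((2 * i : Nat)) : Int) := by push_cast; ring
    have c2 : (((2 * i : Nat) : Int) + 1) = (((2 * i + 1 : Nat)) : Int) := by push_cast; ring
    rw [c1, c2,
      PySem.List.pyGetD_ofNat _ (2 * i) [] (by rw [hrotlen]; omega),
      PySem.List.pyGetD_ofNat _ (2 * i + 1) [] (by rw [hrotlen]; omega)]
    rcases Nat.eq_zero_or_pos i with h0 | hpos
    · subst h0
      have hd0 : 0 < (pvFlat hs).dropLast.length := by
        simp [List.length_dropLast]; omega
      have hg : ((pvFlat hs).getLast hfne :: (pvFlat hs).dropLast)[1]'(by simpa using hd0)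
          = (pvFlat hs)[0]'(by omega) := by
        simp [List.getElem_dropLast]
      simp only [Nat.mul_zero, List.getElem_cons_zero, Nat.zero_add]
      rw [hg, hlastpiece]
      have := (pvFlat_get hs 0 hn (by omega) (by omega)).1
      simp only [Nat.mul_zero] at this
      rw [this]
      simp [pvComb, List.getLast_eq_getElem]
    · -- i ≥ 1: rot[2i] = flat[2i-1] = hs[i-1].2, rot[2i+1] = flat[2i] = hs[i].1
      have hg1 := cons_getElem_pos ((pvFlat hs).getLast hfne) ((pvFlat hs).dropLast)
        (2 * i) (by omega) (by simp [List.length_dropLast]; omega)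
      have hg2 := cons_getElem_pos ((pvFlat hs).getLast hfne) ((pvFlat hs).dropLast)
        (2 * i + 1) (by omega) (by simp [List.length_dropLast]; omega)
      rw [hg1, hg2]
      simp only [List.getElem_dropLast, Nat.add_sub_cancel]
      have e3 : 2 * i - 1 = 2 * (i - 1) + 1 := by omega
      have hv1 : (pvFlat hs)[2 * i - 1]'(by omega) = hs[i - 1].2 := by
        simp only [e3]
        exact (pvFlat_get hs (i - 1) (by omega) (by omega) (by omega)).2
      have hv2 : (pvFlat hs)[2 * i]'(by omega) = hs[i].1 :=
        (pvFlat_get hs i hil (by omega) (by omega)).1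
      rw [hv1, hv2]
      have hilt : i < (hs.getLast h :: hs.dropLast).length := by
        simp [List.length_dropLast]; omega
      have hlt : i - 1 < hs.dropLast.length := by
        simp [List.length_dropLast]; omega
      have hthis : (hs.getLast h :: hs.dropLast)[i]'hilt = hs.dropLast[i - 1]'hlt := by
        rcases i with _ | j
        · omega
        · simp
      simp only [hthis, List.getElem_dropLast, pvComb]

-- the B fold builds exactly the flat pieces list
lemma foldB_pieces (overlay : List (List Int)) :
    overlay.foldl
      (fun (acc : List (List Int)) o =>
        let h := o.length / 2
        (acc ++ [o.take h]) ++ [o.drop h]) []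
    = pvFlat (overlay.map pvHalf) := by
  have : overlay.foldl
      (fun (acc : List (List Int)) o =>
        (acc ++ [o.take (o.length / 2)]) ++ [o.drop (o.length / 2)]) []
      = [] ++ overlay.flatMap (fun o => [o.take (o.length / 2), o.drop (o.length / 2)]) := by
    rw [← PySem.List.foldl_append_eq_flatMap]
    congr 1
    funext acc o
    simp
  simpa [pvFlat, List.flatMap_map, pvHalf, Function.comp] using this

-- ===== VERDICT (by name: the statement is the Claim_ definition above) =====
theorem shift_overlay_spec : Claim_equal_shift_overlay := by
  intro overlay _ hpre
  rcases overlay.eq_nil_or_concat with rfl | ⟨xs, last, rfl⟩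
  · exact absurd rfl hpre
  · unfold Spec_shift_overlay shift_overlay shift_overlay_alt
    simp only [List.concat_eq_append]
    rw [PySem.List.pyGet?_neg_one_append_singleton]
    simp only [PySem.List.slice_to_neg_one, List.dropLast_concat]
    have hA := foldA_eq xs [] (pvHalf last) (pvHalf last)
    simp only [pvHalf, List.nil_append] at hA
    rw [hA]
    -- B side
    rw [foldB_pieces (xs ++ [last]), PySem.List.slice_from_neg_one]
    have hmap : (xs ++ [last]).map pvHalf = xs.map pvHalf ++ [pvHalf last] := by simp
    have hne : (xs ++ [last]).map pvHalf ≠ [] := by simp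
    have hlen : ((xs ++ [last]).map pvHalf).length = (xs ++ [last]).length := by simp
    have hB := rechunkB_eq ((xs ++ [last]).map pvHalf) hne
    rw [hlen] at hB
    rw [hB]
    simp [hmap, pvHalf]

theorem shift_overlay_raises : Claim_raises_shift_overlay := by
  unfold Claim_raises_shift_overlay
  exact ⟨fun overlay _ hr => by simp [Raises_shift_overlay] at hr; simp [hr, Pre_shift_overlay],
    by decide⟩

-- self-check: the raise witness really lies in the raise region (projection of shift_overlay_raises)
theorem pvRaiseWitness_ok : Raises_shift_overlay pvRaiseWitness_shift_overlay :=
  shift_overlay_raises.2.2.1
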